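-- pv_equiv track=rewrite | github.com/ahra1221/Algorithm | 프로그래머스/1/42840. 모의고사/모의고사.py | solution
-- ===== SOURCE A (Python) =====
-- def solution(answers):
--     answer = []
--     student1 = [1, 2, 3, 4, 5]
--     student2 = [2, 1, 2, 3, 2, 4, 2, 5]
--     student3 = [3, 3, 1, 1, 2, 2, 4, 4, 5, 5]
--     score = [0, 0, 0]
--
--     for idx, ans in enumerate(answers):
--         if ans == student1[idx % len(student1)]:
--             score[0] += 1
--         if ans == student2[idx % len(student2)]:
--             score[1] += 1
--         if ans == student3[idx % len(student3)]:
--             score[2] += 1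
--
--     for idx, sc in enumerate(score):
--         if sc == max(score):
--             answer.append(idx+1)
--
--     return answer
-- ===== SOURCE B (Python) =====
-- def solution(answers):
--     # Bucket-count (position mod 40, answer) pairs once; since each pattern's
--     # period divides lcm(5,8,10)=40, every score is then a fixed 40-entry lookup sum.
--     hist = {}
--     for i, a in enumerate(answers):
--         key = (i % 40, a)
--         hist[key] = hist.get(key, 0) + 1
--     patterns = [[1, 2, 3, 4, 5],
--                 [2, 1, 2, 3, 2, 4, 2, 5],
--                 [3, 3, 1, 1, 2, 2, 4, 4, 5, 5]]
--     scores = [sum(hist.get((r, pat[r % len(pat)]), 0) for r in range(40))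
--               for pat in patterns]
--     best = max(scores)
--     return [i + 1 for i, s in enumerate(scores) if s == best]
-- ===== Notes on version B (the rewrite author's own statement) =====
-- stated objective: alternative
-- what changed: Replaces A's fused per-element pattern comparison by a bucket-counting algorithm: one pass builds a histogram keyed by (index mod 40, answer) (40 = lcm of the three pattern periods), then each student's score is a fixed 40-entry lookup sum into that histogram, so no pattern comparison happens during the scan of the answers.
import Mathlib
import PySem

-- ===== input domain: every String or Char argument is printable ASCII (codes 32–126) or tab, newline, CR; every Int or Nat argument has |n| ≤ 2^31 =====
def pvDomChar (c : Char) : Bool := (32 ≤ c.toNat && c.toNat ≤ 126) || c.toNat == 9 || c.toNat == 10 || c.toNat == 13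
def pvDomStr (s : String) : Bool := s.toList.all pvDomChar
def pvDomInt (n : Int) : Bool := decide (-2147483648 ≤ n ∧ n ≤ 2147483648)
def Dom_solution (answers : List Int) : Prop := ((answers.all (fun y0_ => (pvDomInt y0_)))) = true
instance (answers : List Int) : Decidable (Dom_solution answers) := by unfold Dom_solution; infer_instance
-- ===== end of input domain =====

-- B replaces A's fused per-element pattern comparison by bucket counting: one pass builds a
-- histogram keyed by (index mod 40, answer) (40 = lcm of the pattern periods), then each score
-- is a fixed 40-entry lookup sum into that histogram (objective: alternative).

-- ===== PORT A =====
-- the 'for idx, ans in enumerate(answers)' loop, carrying the running index and the score list (0,1,2)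
def solutionLoop (student1 student2 student3 : List Int) (idx : Nat) (l : List Int)
    (score : Int × Int × Int) : Int × Int × Int :=
  match l with
  | [] => score
  | ans :: rest =>
      let s0 := if ans = student1.getD (idx % student1.length) 0 then score.1 + 1 else score.1
      let s1 := if ans = student2.getD (idx % student2.length) 0 then score.2.1 + 1 else score.2.1
      let s2 := if ans = student3.getD (idx % student3.length) 0 then score.2.2 + 1 else score.2.2
      solutionLoop student1 student2 student3 (idx + 1) rest (s0, s1, s2)

def solution (answers : List Int) : List Int :=
  let student1 : List Int := [1, 2, 3, 4, 5]
  let student2 : List Int := [2, 1, 2, 3, 2, 4, 2, 5]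
  let student3 : List Int := [3, 3, 1, 1, 2, 2, 4, 4, 5, 5]
  let sc := solutionLoop student1 student2 student3 0 answers (0, 0, 0)
  let score : List Int := [sc.1, sc.2.1, sc.2.2]
  (PySem.List.enumerate score 0).foldl
    (fun acc p =>
      if p.2 = (PySem.List.max? score (fun y => y)).getD 0 then acc ++ [p.1 + 1] else acc) []

-- ===== PORT B =====
-- Source B's histogram pass: hist[(i % 40, a)] = hist.get(key, 0) + 1 over enumerate(answers)
def histOf (answers : List Int) : PySem.Dict (Int × Int) Int :=
  (PySem.List.enumerate answers 0).foldl
    (fun d p =>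
      d.insert (PySem.Int.mod p.1 40, p.2) ((d.getD (PySem.Int.mod p.1 40, p.2) 0) + 1))
    PySem.Dict.empty

-- Source B's 'sum(hist.get((r, pat[r % len(pat)]), 0) for r in range(40))'
def histScore (hist : PySem.Dict (Int × Int) Int) (pat : List Int) : Int :=
  ((PySem.List.pyRange 0 40 1).map
    (fun r => hist.getD (r, PySem.List.pyGetD pat (PySem.Int.mod r (pat.length : Int)) 0) 0)).sum

def solution_alt (answers : List Int) : List Int :=
  let hist := histOf answers
  let patterns : List (List Int) :=
    [[1, 2, 3, 4, 5], [2, 1, 2, 3, 2, 4, 2, 5], [3, 3, 1, 1, 2, 2, 4, 4, 5, 5]]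
  let scores := patterns.map (fun pat => histScore hist pat)
  let best := (PySem.List.max? scores (fun y => y)).getD 0
  (PySem.List.enumerate scores 0).filterMap
    (fun p => if p.2 = best then some (p.1 + 1) else none)

-- ===== PRECONDITION & SPEC =====
def Spec_solution (answers : List Int) (out : List Int) : Prop := out = solution_alt answers
instance (answers : List Int) (out : List Int) : Decidable (Spec_solution answers out) := by unfold Spec_solution; infer_instance

-- ===== CLAIM (what is proved, stated in full; the proofs are below) =====
def Claim_equal_solution : Prop := ∀ (answers : List Int), Dom_solution answers → Spec_solution answers (solution answers)

-- ===== LEMMAS AND PROOFS =====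

-- match count of l against f, starting at position i (characterises A's fused loop)
def cnt (f : Nat → Int) (i : Nat) (l : List Int) : Int :=
  match l with
  | [] => 0
  | a :: t => (if a = f i then 1 else 0) + cnt f (i + 1) t

theorem solutionLoop_eq (p1 p2 p3 : List Int) :
    ∀ (l : List Int) (idx : Nat) (s0 s1 s2 : Int),
      solutionLoop p1 p2 p3 idx l (s0, s1, s2) =
        (s0 + cnt (fun i => p1.getD (i % p1.length) 0) idx l,
         s1 + cnt (fun i => p2.getD (i % p2.length) 0) idx l,
         s2 + cnt (fun i => p3.getD (i % p3.length) 0) idx l) := by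
  intro l
  induction l with
  | nil => intro idx s0 s1 s2; simp [solutionLoop, cnt]
  | cons a t ih =>
      intro idx s0 s1 s2
      simp only [solutionLoop, cnt, ih]
      refine Prod.ext ?_ (Prod.ext ?_ ?_) <;> simp <;> split_ifs <;> ring

-- the keyed list whose counts the histogram records
def keyed (answers : List Int) (s : Int) : List (Int × Int) :=
  (PySem.List.enumerate answers s).map (fun p => (PySem.Int.mod p.1 40, p.2))

theorem histOf_getD (answers : List Int) (k : Int × Int) :
    (histOf answers).getD k 0 = ((keyed answers 0).count k : Int) := by
  have h : histOf answers =
      (keyed answers 0).foldl (fun d x => d.insert x (d.getD x 0 + 1)) PySem.Dict.empty := by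
    unfold histOf keyed
    rw [List.foldl_map]
  rw [h, PySem.Dict.getD_foldl_insert_add_one]
  simp [PySem.Dict.getD_empty]

-- picking out the one matching residue from the 40-entry sum
theorem sum_pick_zero (g : Int → Int) (m a : Int) :
    ∀ (L : List Int), m ∉ L →
      (L.map (fun r => if ((m, a) : Int × Int) = (r, g r) then (1 : Int) else 0)).sum = 0 := by
  intro L
  induction L with
  | nil => intro _; simp
  | cons r t ih =>
      intro h
      simp only [List.map_cons, List.sum_cons]
      rw [ih (fun hm => h (List.mem_cons_of_mem r hm))]
      have hr : m ≠ r := fun he => h (he ▸ List.mem_cons_self)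
      simp [Prod.ext_iff, hr]

theorem sum_pick (g : Int → Int) (m a : Int) :
    ∀ (L : List Int), L.count m = 1 →
      (L.map (fun r => if ((m, a) : Int × Int) = (r, g r) then (1 : Int) else 0)).sum =
        if a = g m then 1 else 0 := by
  intro L
  induction L with
  | nil => intro h; simp at h
  | cons r t ih =>
      intro h
      simp only [List.count_cons, beq_iff_eq] at h
      simp only [List.map_cons, List.sum_cons]
      by_cases hr : r = m
      · subst hr
        have ht : r ∉ t := by
          rw [← List.count_eq_zero]
          simpa using h
        rw [sum_pick_zero g r a t ht]
        by_cases ha : a = g r <;> simp [Prod.ext_iff, ha]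
      · rw [if_neg hr, Nat.add_zero] at h
        rw [ih h]
        have hr' : m ≠ r := fun he => hr he.symm
        simp [Prod.ext_iff, hr']

-- the 40-entry lookup sum counts matches of l against r ↦ g (r mod 40)
def icnt (g : Int → Int) (s : Int) (l : List Int) : Int :=
  match l with
  | [] => 0
  | a :: t => (if a = g (PySem.Int.mod s 40) then 1 else 0) + icnt g (s + 1) t

theorem count40 : ∀ (m : Int), 0 ≤ m → m < 40 → (PySem.List.pyRange 0 40 1).count m = 1 := by
  decide

theorem sum_count_keyed (g : Int → Int) :
    ∀ (l : List Int) (s : Int),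
      ((PySem.List.pyRange 0 40 1).map
        (fun r => ((keyed l s).count (r, g r) : Int))).sum = icnt g s l := by
  intro l
  induction l with
  | nil =>
      intro s
      simp [keyed, icnt, PySem.List.enumerate_nil]
  | cons a t ih =>
      intro s
      have hk : keyed (a :: t) s = (PySem.Int.mod s 40, a) :: keyed t (s + 1) := by
        simp [keyed, PySem.List.enumerate_cons]
      simp only [hk, icnt, List.count_cons, beq_iff_eq]
      have hsplit :
          ((PySem.List.pyRange 0 40 1).map
            (fun r => (((keyed t (s+1)).count (r, g r) +
                (if ((PySem.Int.mod s 40, a) : Int × Int) = (r, g r) then 1 else 0) : Nat) : Int))).sum =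
          ((PySem.List.pyRange 0 40 1).map
            (fun r => ((keyed t (s+1)).count (r, g r) : Int))).sum +
          ((PySem.List.pyRange 0 40 1).map
            (fun r => if ((PySem.Int.mod s 40, a) : Int × Int) = (r, g r) then (1 : Int) else 0)).sum := by
        induction (PySem.List.pyRange 0 40 1) with
        | nil => simp
        | cons x xs ihx =>
            simp only [List.map_cons, List.sum_cons, ihx]
            push_cast
            split_ifs <;> ring
      rw [hsplit, ih (s + 1),
        sum_pick g (PySem.Int.mod s 40) a _
          (count40 _ (PySem.Int.mod_nonneg s (by norm_num)) (PySem.Int.mod_lt s (by norm_num)))]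
      ring

theorem icnt_eq_cnt (pat : List Int) (hdvd : pat.length ∣ 40) :
    ∀ (l : List Int) (idx : Nat),
      icnt (fun r => PySem.List.pyGetD pat (PySem.Int.mod r (pat.length : Int)) 0) (idx : Int) l =
        cnt (fun i => pat.getD (i % pat.length) 0) idx l := by
  intro l
  induction l with
  | nil => intro idx; simp [icnt, cnt]
  | cons a t ih =>
      intro idx
      have h1 : PySem.Int.mod (idx : Int) 40 = ((idx % 40 : Nat) : Int) := by
        exact_mod_cast PySem.Int.mod_natCast idx 40
      have h2 : PySem.Int.mod ((idx % 40 : Nat) : Int) (pat.length : Int) =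
          ((idx % 40 % pat.length : Nat) : Int) := PySem.Int.mod_natCast _ _
      have h3 : idx % 40 % pat.length = idx % pat.length := Nat.mod_mod_of_dvd idx hdvd
      have hcast : ((idx : Int) + 1) = ((idx + 1 : Nat) : Int) := by push_cast; ring
      simp only [icnt, cnt, h1, h2, h3, hcast, ih (idx + 1)]
      rw [PySem.List.pyGetD_natCast]

theorem histScore_eq (answers pat : List Int) (hdvd : pat.length ∣ 40) :
    histScore (histOf answers) pat = cnt (fun i => pat.getD (i % pat.length) 0) 0 answers := by
  unfold histScore
  have : ∀ r : Int,
      (histOf answers).getD (r, PySem.List.pyGetD pat (PySem.Int.mod r (pat.length : Int)) 0) 0 =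
      ((keyed answers 0).count
        (r, (fun r => PySem.List.pyGetD pat (PySem.Int.mod r (pat.length : Int)) 0) r) : Int) := by
    intro r; exact histOf_getD answers _
  simp only [this]
  rw [sum_count_keyed]
  exact_mod_cast icnt_eq_cnt pat hdvd answers 0

theorem filterMap_if_eq (M : Int) :
    ∀ (l : List (Int × Int)) (acc : List Int),
      l.foldl (fun acc p => if p.2 = M then acc ++ [p.1 + 1] else acc) acc =
        acc ++ l.filterMap (fun p => if p.2 = M then some (p.1 + 1) else none) := by
  intro l
  induction l with
  | nil => intro acc; simp
  | cons x t ih =>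
      intro acc
      simp only [List.foldl_cons, List.filterMap_cons]
      by_cases h : x.2 = M <;> simp [h, ih]

-- ===== VERDICT (by name: the statement is the Claim_ definition above) =====
theorem solution_spec : Claim_equal_solution := by
  intro answers _
  unfold Spec_solution solution solution_alt
  simp only [List.map_cons, List.map_nil, solutionLoop_eq, zero_add,
    histScore_eq answers [1, 2, 3, 4, 5] (by norm_num),
    histScore_eq answers [2, 1, 2, 3, 2, 4, 2, 5] (by norm_num),
    histScore_eq answers [3, 3, 1, 1, 2, 2, 4, 4, 5, 5] (by norm_num)]
  rw [filterMap_if_eq]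
  simp
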